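-- pv_equiv track=rewrite | github.com/nammayatri/nammayatri | Frontend/ui-customer/stringGen.py | strformator
-- ===== SOURCE A (Python) =====
-- def strformator(s,s1):
--     a=s.split(" ")
--     final_str = ""
--     j=1
--     for i in s1:
--         if i == '*':
--             final_str += a[j-1]
--             j+=1
--         elif i == "{":
--             final_str += '"<>'
--         elif i == "}":
--             final_str += '<>"'
--         else:
--             final_str+=i
--     return final_str
-- ===== SOURCE B (Python) =====
-- def _sub(seg):
--     return seg.replace("{", '"<>').replace("}", '<>"')
--
--
-- def strformator(s, s1):
--     tokens = s.split(" ")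
--     segs = s1.split("*")
--     parts = [_sub(segs[0])]
--     for i in range(1, len(segs)):
--         parts.append(tokens[i - 1])
--         parts.append(_sub(segs[i]))
--     return "".join(parts)
-- ===== Notes on version B (the rewrite author's own statement) =====
-- stated objective: faster
-- what changed: B splits the template on '*' once and interleaves the brace-substituted segments (via str.replace) with the tokens, instead of A's per-character branch loop with a running token counter.
import Mathlib
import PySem

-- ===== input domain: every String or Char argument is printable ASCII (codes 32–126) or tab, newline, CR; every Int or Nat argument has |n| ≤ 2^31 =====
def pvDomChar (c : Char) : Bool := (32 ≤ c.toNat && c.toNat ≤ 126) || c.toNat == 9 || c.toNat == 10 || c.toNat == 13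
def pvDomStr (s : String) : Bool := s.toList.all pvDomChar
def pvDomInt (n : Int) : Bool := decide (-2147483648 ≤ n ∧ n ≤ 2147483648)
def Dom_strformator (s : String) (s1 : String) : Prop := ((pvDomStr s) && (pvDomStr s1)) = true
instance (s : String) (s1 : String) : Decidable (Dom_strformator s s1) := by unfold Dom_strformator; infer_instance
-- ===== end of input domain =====

-- B replaces A's per-character branch loop (running token counter) by split-on-'*' and
-- interleaving brace-substituted segments with the tokens; objective: alternative decomposition.

-- ===== PORT A =====
-- per-character loop over s1 with state (final_str, j); a[j-1] out of range is excluded by Pre_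
def strformator (s : String) (s1 : String) : String :=
  let a := PySem.Chars.splitOn s.toList [' ']
  let st := s1.toList.foldl (fun (st : List Char × Int) i =>
    if i = '*' then (st.1 ++ (PySem.List.pyGet? a (st.2 - 1)).getD [], st.2 + 1)
    else if i = '{' then (st.1 ++ ['"', '<', '>'], st.2)
    else if i = '}' then (st.1 ++ ['<', '>', '"'], st.2)
    else (st.1 ++ [i], st.2)) ([], 1)
  String.ofList st.1

-- ===== PORT B =====
-- _sub(seg) = seg.replace('{','"<>').replace('}','<>"')
def pvSub (seg : List Char) : List Char :=
  PySem.Chars.replace (PySem.Chars.replace seg ['{'] ['"', '<', '>']) ['}'] ['<', '>', '"']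

def strformator_alt (s : String) (s1 : String) : String :=
  let tokens := PySem.Chars.splitOn s.toList [' ']
  let segs := PySem.Chars.splitOn s1.toList ['*']
  let parts := pvSub ((PySem.List.pyGet? segs 0).getD [])
  let out := (PySem.List.pyRange 1 segs.length 1).foldl
    (fun acc i => acc ++ (PySem.List.pyGet? tokens (i - 1)).getD []
                      ++ pvSub ((PySem.List.pyGet? segs i).getD [])) parts
  String.ofList out

-- ===== PRECONDITION & SPEC =====
-- Pre_ excludes exactly the inputs where Python A raises IndexError: more '*' in s1 than tokens in s.split(" ")
def Pre_strformator (s : String) (s1 : String) : Prop :=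
  s1.toList.count '*' ≤ s.toList.count ' ' + 1
instance (s : String) (s1 : String) : Decidable (Pre_strformator s s1) := by
  unfold Pre_strformator; infer_instance
def pvWitness_strformator : String × String := ("hello world", "a * and {*}!")

def Spec_strformator (s : String) (s1 : String) (out : String) : Prop := out = strformator_alt s s1
instance (s : String) (s1 : String) (out : String) : Decidable (Spec_strformator s s1 out) := by unfold Spec_strformator; infer_instance

-- ===== CLAIM (what is proved, stated in full; the proofs are below) =====
def Claim_equal_strformator : Prop := ∀ (s : String) (s1 : String), Dom_strformator s s1 → Pre_strformator s s1 → Spec_strformator s s1 (strformator s s1)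

-- ===== LEMMAS AND PROOFS =====

-- single-character substitution used by A's loop on non-'*' characters
def pvSub1 (c : Char) : List Char :=
  if c = '{' then ['"', '<', '>'] else if c = '}' then ['<', '>', '"'] else [c]

-- recursive characterisation of splitting on '*'
def pvSplitStar : List Char → List (List Char)
  | [] => [[]]
  | c :: cs =>
    if c = '*' then [] :: pvSplitStar cs
    else match pvSplitStar cs with
      | [] => [[c]]
      | h :: t => (c :: h) :: t

-- A's loop, head-recursively, with token list a and counter j
def pvSpec (a : List (List Char)) (j : Int) : List Char → List Char
  | [] => []
  | c :: cs =>
    if c = '*' then (PySem.List.pyGet? a (j - 1)).getD [] ++ pvSpec a (j + 1) cs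
    else pvSub1 c ++ pvSpec a j cs

-- B's interleave of remaining segments with tokens, counter j
def pvInter (a : List (List Char)) : List (List Char) → Int → List Char
  | [], _ => []
  | seg :: t, j =>
      (PySem.List.pyGet? a (j - 1)).getD [] ++ seg.flatMap pvSub1 ++ pvInter a t (j + 1)

theorem pvSplitStar_ne_nil (cs : List Char) : pvSplitStar cs ≠ [] := by
  induction cs with
  | nil => simp [pvSplitStar]
  | cons c cs ih =>
    simp only [pvSplitStar]
    split
    · simp
    · cases h : pvSplitStar cs <;> simp

theorem pvSplitOn_go_star (l : List Char) : ∀ (fuel : Nat) (cur : List Char) (acc : List (List Char)),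
    l.length < fuel →
    PySem.Chars.splitOn.go ['*'] fuel l cur acc
      = acc.reverse ++ (match pvSplitStar l with
          | [] => []
          | h :: t => (cur.reverse ++ h) :: t) := by
  induction l with
  | nil =>
    intro fuel cur acc h
    match fuel with
    | fuel + 1 => simp [PySem.Chars.splitOn.go, pvSplitStar]
  | cons c t ih =>
    intro fuel cur acc h
    match fuel with
    | fuel + 1 =>
      by_cases hc : c = '*'
      · subst hc
        have hpre : List.isPrefixOf ['*'] ('*' :: t) = true := by simp [List.isPrefixOf]
        rw [PySem.Chars.splitOn.go, if_pos hpre]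
        simp only [List.length_cons, List.length_nil, List.drop_succ_cons, List.drop_zero]
        simp only [List.length_cons] at h
        rw [ih fuel [] (cur.reverse :: acc) (by omega)]
        cases hs : pvSplitStar t with
        | nil => exact absurd hs (pvSplitStar_ne_nil t)
        | cons h' t' => simp [pvSplitStar, hs]
      · have hpre : List.isPrefixOf ['*'] (c :: t) = false := by
          simp [List.isPrefixOf]; exact fun h => absurd h.symm hc
        rw [PySem.Chars.splitOn.go, if_neg (by simp [hpre])]
        simp only [List.length_cons] at h
        rw [ih fuel (c :: cur) acc (by omega)]
        cases hs : pvSplitStar t with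
        | nil => exact absurd hs (pvSplitStar_ne_nil t)
        | cons h' t' => simp [pvSplitStar, hs, hc]

theorem pvSplitOn_star (cs : List Char) :
    PySem.Chars.splitOn cs ['*'] = pvSplitStar cs := by
  rw [PySem.Chars.splitOn, pvSplitOn_go_star cs (cs.length + 1) [] [] (by omega)]
  cases hs : pvSplitStar cs with
  | nil => exact absurd hs (pvSplitStar_ne_nil cs)
  | cons h t => simp

theorem pvReplace_go_single (c0 : Char) (new : List Char) (l : List Char) :
    ∀ (fuel : Nat) (acc : List Char), l.length ≤ fuel →
    PySem.Chars.replace.go [c0] new fuel l acc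
      = acc.reverse ++ l.flatMap (fun c => if c = c0 then new else [c]) := by
  induction l with
  | nil =>
    intro fuel acc h
    match fuel with
    | 0 => simp [PySem.Chars.replace.go]
    | fuel + 1 => simp [PySem.Chars.replace.go]
  | cons c t ih =>
    intro fuel acc h
    simp only [List.length_cons] at h
    match fuel with
    | fuel + 1 =>
      by_cases hc : c = c0
      · subst hc
        have hpre : List.isPrefixOf [c] (c :: t) = true := by simp [List.isPrefixOf]
        rw [PySem.Chars.replace.go, if_pos hpre]
        simp only [List.length_cons, List.length_nil, List.drop_succ_cons, List.drop_zero]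
        rw [ih fuel (new.reverse ++ acc) (by omega)]
        simp
      · have hpre : List.isPrefixOf [c0] (c :: t) = false := by
          simp [List.isPrefixOf]; exact fun h => absurd h.symm hc
        rw [PySem.Chars.replace.go, if_neg (by simp [hpre])]
        rw [ih fuel (c :: acc) (by omega)]
        simp [hc]

theorem pvReplace_single (c0 : Char) (new : List Char) (l : List Char) :
    PySem.Chars.replace l [c0] new = l.flatMap (fun c => if c = c0 then new else [c]) := by
  rw [PySem.Chars.replace]
  simp only [List.isEmpty_cons, if_false, Bool.false_eq_true]
  exact pvReplace_go_single c0 new l l.length [] le_rfl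

theorem pvSub_eq_flatMap (seg : List Char) : pvSub seg = seg.flatMap pvSub1 := by
  rw [pvSub, pvReplace_single, pvReplace_single]
  induction seg with
  | nil => simp
  | cons c t ih =>
    simp only [List.flatMap_cons, List.flatMap_append, ih]
    congr 1
    by_cases h1 : c = '{'
    · subst h1; simp [pvSub1]
    · by_cases h2 : c = '}'
      · subst h2; simp [pvSub1]
      · simp [pvSub1, h1, h2]

theorem pvFoldA (a : List (List Char)) (cs : List Char) :
    ∀ (acc : List Char) (j : Int),
    (cs.foldl (fun (st : List Char × Int) i =>
      if i = '*' then (st.1 ++ (PySem.List.pyGet? a (st.2 - 1)).getD [], st.2 + 1)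
      else if i = '{' then (st.1 ++ ['"', '<', '>'], st.2)
      else if i = '}' then (st.1 ++ ['<', '>', '"'], st.2)
      else (st.1 ++ [i], st.2)) (acc, j)).1 = acc ++ pvSpec a j cs := by
  induction cs with
  | nil => intro acc j; simp [pvSpec]
  | cons c t ih =>
    intro acc j
    by_cases h1 : c = '*'
    · subst h1; simp [pvSpec, ih]
    · by_cases h2 : c = '{'
      · subst h2; simp [pvSpec, pvSub1, ih]
      · by_cases h3 : c = '}'
        · subst h3; simp [pvSpec, pvSub1, h1, ih]
        · simp [pvSpec, pvSub1, h1, h2, h3, ih]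

theorem pvSpec_eq_inter (a : List (List Char)) (cs : List Char) :
    ∀ (j : Int),
    pvSpec a j cs = (match pvSplitStar cs with
      | [] => []
      | h :: t => h.flatMap pvSub1 ++ pvInter a t j) := by
  induction cs with
  | nil => intro j; simp [pvSpec, pvSplitStar, pvInter]
  | cons c t ih =>
    intro j
    by_cases hc : c = '*'
    · subst hc
      cases hs : pvSplitStar t with
      | nil => exact absurd hs (pvSplitStar_ne_nil t)
      | cons h' t' =>
        simp only [pvSpec, pvSplitStar, ih, hs]
        simp [pvInter]
    · cases hs : pvSplitStar t with
      | nil => exact absurd hs (pvSplitStar_ne_nil t)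
      | cons h' t' =>
        simp only [pvSpec, pvSplitStar, hs, ih, hc, if_false]
        simp

theorem pvFoldB (a segs : List (List Char)) :
    ∀ (k : Nat) (acc : List Char),
    ((PySem.List.pyRange (k : Int) segs.length 1).foldl
      (fun acc i => acc ++ (PySem.List.pyGet? a (i - 1)).getD []
                        ++ pvSub ((PySem.List.pyGet? segs i).getD [])) acc)
      = acc ++ pvInter a (segs.drop k) k := by
  intro k
  induction hk : segs.length - k using Nat.strong_induction_on generalizing k with
  | _ n ih =>
    intro acc
    by_cases h : k < segs.length
    · have hcons : PySem.List.pyRange (k : Int) segs.length 1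
          = (k : Int) :: PySem.List.pyRange ((k : Int) + 1) segs.length 1 :=
        PySem.List.pyRange_one_cons (by exact_mod_cast h)
      have hdrop : segs.drop k = segs[k] :: segs.drop (k + 1) :=
        List.drop_eq_getElem_cons h
      have hget : PySem.List.pyGet? segs (k : Int) = some segs[k] := by
        rw [PySem.List.pyGet?_natCast]
        exact List.getElem?_eq_getElem h
      rw [hcons]
      simp only [List.foldl_cons]
      have : ((k : Int) + 1) = ((k + 1 : Nat) : Int) := by push_cast; ring
      rw [this, ih (n - 1) (by omega) (k + 1) (by omega)]
      rw [hdrop]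
      simp [pvInter, hget, pvSub_eq_flatMap]
    · have hle : (segs.length : Int) ≤ (k : Int) := by exact_mod_cast Nat.le_of_not_lt h
      have hrange : PySem.List.pyRange (k : Int) segs.length 1 = [] := by
        simp [PySem.List.pyRange]; omega
      have hdrop : segs.drop k = [] := List.drop_eq_nil_of_le (Nat.le_of_not_lt h)
      simp [hrange, hdrop, pvInter]

-- ===== VERDICT (by name: the statement is the Claim_ definition above) =====
theorem strformator_spec : Claim_equal_strformator := by
  intro s s1 _ _
  unfold Spec_strformator strformator strformator_alt
  simp only [pvSplitOn_star]
  rw [pvFoldA (PySem.Chars.splitOn s.toList [' ']) s1.toList [] 1]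
  rw [pvSpec_eq_inter]
  cases hs : pvSplitStar s1.toList with
  | nil => exact absurd hs (pvSplitStar_ne_nil s1.toList)
  | cons h t =>
    have h0 : PySem.List.pyGet? (h :: t) (0 : Int) = some h := by
      simp [PySem.List.pyGet?, PySem.List.pyIdx?]
    have hfold := pvFoldB (PySem.Chars.splitOn s.toList [' ']) (h :: t) 1 (pvSub h)
    simp only [Nat.cast_one] at hfold
    rw [h0]
    simp only [Option.getD_some]
    rw [hfold]
    simp [pvSub_eq_flatMap]
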